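-- pv_equiv track=rewrite | github.com/kimjiho1125/AlgorithmStudy | 프로그래머스/unrated/132265. 롤케이크 자르기/롤케이크 자르기.py | solution
-- ===== SOURCE A (Python) =====
-- def solution(topping):
--     answer = 0
--     olderBro = {}
--     youngerBro = {}
--     for item in topping:
--         if item not in olderBro:
--             olderBro[item] = 1
--         else:
--             olderBro[item] += 1
--
--     for item in topping:
--         if item not in youngerBro:
--             youngerBro[item] = 1
--             olderBro[item] -= 1
--         else:
--             youngerBro[item] += 1
--             olderBro[item] -= 1
--
--         if youngerBro[item] == 0:
--             del youngerBro[item]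
--         if olderBro[item] == 0:
--             del olderBro[item]
--
--         if len(olderBro.keys()) == len(youngerBro.keys()):
--             answer += 1
--     return answer
-- ===== SOURCE B (Python) =====
-- def solution(topping):
--     # suffix pass: suf[i] = number of distinct toppings in topping[i:]
--     cnt = {}
--     suf = [0]
--     for x in reversed(topping):
--         cnt[x] = cnt.get(x, 0) + 1
--         suf.append(len(cnt))
--     suf.reverse()
--     # prefix pass: compare distinct-so-far with the precomputed suffix table
--     seen = set()
--     answer = 0
--     for x, s in zip(topping, suf[1:]):
--         seen.add(x)
--         if len(seen) == s:
--             answer += 1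
--     return answer
-- ===== Notes on version B (the rewrite author's own statement) =====
-- stated objective: alternative
-- what changed: Replaces A's single sweep that mutates two multiset dicts simultaneously (with in-loop key deletions) by a two-phase decomposition: a right-to-left pass precomputing a suffix distinct-count table, then a left-to-right pass growing a prefix set and comparing against the table.
import Mathlib
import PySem

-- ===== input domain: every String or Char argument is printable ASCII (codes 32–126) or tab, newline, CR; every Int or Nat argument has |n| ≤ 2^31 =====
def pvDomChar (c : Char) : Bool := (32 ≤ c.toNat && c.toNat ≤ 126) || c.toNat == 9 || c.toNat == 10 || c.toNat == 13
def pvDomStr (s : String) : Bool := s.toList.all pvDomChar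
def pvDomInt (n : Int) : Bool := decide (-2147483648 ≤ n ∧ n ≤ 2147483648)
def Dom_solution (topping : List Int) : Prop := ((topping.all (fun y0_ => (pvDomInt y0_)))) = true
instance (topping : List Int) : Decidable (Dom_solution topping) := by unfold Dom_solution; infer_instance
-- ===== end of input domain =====

-- B replaces A's simultaneous two-dict sweep by a suffix distinct-count table plus a forward prefix-set pass (alternative decomposition, same cost).

-- ===== PORT A =====
-- first loop: build olderBro = multiset of all toppings
def solutionStep1 (d : PySem.Dict Int Int) (item : Int) : PySem.Dict Int Int :=
  if d.contains item then d.insert item (d.getD item 0 + 1) else d.insert item 1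

-- second loop body: state = (answer, olderBro, youngerBro)
def solutionStep2 (st : Int × PySem.Dict Int Int × PySem.Dict Int Int) (item : Int) :
    Int × PySem.Dict Int Int × PySem.Dict Int Int :=
  let answer := st.1
  let older := st.2.1
  let younger := st.2.2
  let younger :=
    if younger.contains item then younger.insert item (younger.getD item 0 + 1)
    else younger.insert item 1
  let older := older.insert item (older.getD item 0 - 1)
  let younger := if younger.getD item 0 = 0 then younger.erase item else younger
  let older := if older.getD item 0 = 0 then older.erase item else older
  let answer := if older.size = younger.size then answer + 1 else answer
  (answer, older, younger)

def solution (topping : List Int) : Int :=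
  let olderBro := topping.foldl solutionStep1 PySem.Dict.empty
  (topping.foldl solutionStep2 (0, olderBro, PySem.Dict.empty)).1

-- ===== PORT B =====
-- suffix pass body: cnt counts the elements seen so far (scanning reversed(topping)), suf collects len(cnt)
def altStep1 (st : PySem.Dict Int Int × List Int) (x : Int) : PySem.Dict Int Int × List Int :=
  let cnt := st.1.insert x (st.1.getD x 0 + 1)
  (cnt, st.2 ++ [(cnt.size : Int)])

-- prefix pass body: state = (seen, answer)
def altStep2 (st : PySem.Set Int × Int) (xs : Int × Int) : PySem.Set Int × Int :=
  let seen := PySem.Set.add st.1 xs.1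
  (seen, if PySem.Set.len seen = xs.2 then st.2 + 1 else st.2)

def solution_alt (topping : List Int) : Int :=
  let p1 := topping.reverse.foldl altStep1 (PySem.Dict.empty, [0])
  let suf := p1.2.reverse
  ((topping.zip (PySem.List.slice suf (some 1) none)).foldl altStep2 (PySem.Set.empty, 0)).2

-- ===== PRECONDITION & SPEC =====
def Spec_solution (topping : List Int) (out : Int) : Prop := out = solution_alt topping
instance (topping : List Int) (out : Int) : Decidable (Spec_solution topping out) := by unfold Spec_solution; infer_instance

-- ===== CLAIM (what is proved, stated in full; the proofs are below) =====
def Claim_equal_solution : Prop := ∀ (topping : List Int), Dom_solution topping → Spec_solution topping (solution topping)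

-- ===== LEMMAS AND PROOFS =====

-- number of distinct elements of a list
def dcount (l : List Int) : Nat := (PySem.Set.ofList l).length

-- the common recursive specification: gold p r counts the cut points inside r
-- (p = prefix already consumed) where prefix and suffix hold equally many distinct toppings
def gold (p r : List Int) : Int :=
  match r with
  | [] => 0
  | x :: r' => (if dcount (p ++ [x]) = dcount r' then 1 else 0) + gold (p ++ [x]) r'

lemma gold_cons (p : List Int) (x : Int) (r' : List Int) :
    gold p (x :: r') = (if dcount (p ++ [x]) = dcount r' then 1 else 0) + gold (p ++ [x]) r' := rfl

lemma dcount_congr {a b : List Int} (h : ∀ x, x ∈ a ↔ x ∈ b) : dcount a = dcount b := by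
  unfold dcount
  have hperm : (PySem.Set.ofList a).Perm (PySem.Set.ofList b) := by
    rw [List.perm_ext_iff_of_nodup (PySem.Set.nodup_ofList a) (PySem.Set.nodup_ofList b)]
    intro x
    simp only [PySem.Set.mem_ofList, h x]
  exact hperm.length_eq

lemma counter_snoc (p : List Int) (x : Int) :
    PySem.Dict.counter (p ++ [x]) =
      (PySem.Dict.counter p).insert x ((PySem.Dict.counter p).getD x 0 + 1) := by
  rw [← PySem.Dict.foldl_insert_getD_add_one_eq_counter,
      ← PySem.Dict.foldl_insert_getD_add_one_eq_counter, List.foldl_append]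
  rfl

lemma step1_eq (d : PySem.Dict Int Int) (item : Int) :
    solutionStep1 d item = d.insert item (d.getD item 0 + 1) := by
  unfold solutionStep1
  by_cases h : d.contains item
  · simp [h]
  · have h' : d.contains item = false := by simpa using h
    rw [if_neg h, PySem.Dict.getD_of_not_contains d 0 h']
    norm_num

lemma foldl_step1_eq_counter (l : List Int) :
    l.foldl solutionStep1 PySem.Dict.empty = PySem.Dict.counter l := by
  have h : l.foldl solutionStep1 PySem.Dict.empty
      = l.foldl (fun d x => d.insert x (d.getD x 0 + 1)) PySem.Dict.empty := by
    congr 1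
    funext d x
    exact step1_eq d x
  rw [h, PySem.Dict.foldl_insert_getD_add_one_eq_counter]

-- ---- erase facts (PySem has no lemmas about Dict.erase) ----
lemma keys_erase_mem (d : PySem.Dict Int Int) (k x : Int) :
    x ∈ (d.erase k).keys ↔ x ∈ d.keys ∧ x ≠ k := by
  simp only [PySem.Dict.erase, PySem.Dict.keys, List.mem_map, List.mem_filter]
  constructor
  · rintro ⟨p, ⟨hp, hne⟩, rfl⟩
    exact ⟨⟨p, hp, rfl⟩, by simpa using hne⟩
  · rintro ⟨⟨p, hp, rfl⟩, hne⟩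
    exact ⟨p, ⟨hp, by simpa using hne⟩, rfl⟩

lemma nodup_keys_erase (d : PySem.Dict Int Int) (k : Int) (h : d.keys.Nodup) :
    (d.erase k).keys.Nodup := by
  simp only [PySem.Dict.erase, PySem.Dict.keys] at *
  exact List.Nodup.sublist (List.Sublist.map _ List.filter_sublist) h

lemma find?_filter_ne (items : List (Int × Int)) (k x : Int) (hxk : x ≠ k) :
    List.find? (fun p => p.1 == x) (items.filter (fun p => !(p.1 == k)))
      = List.find? (fun p => p.1 == x) items := by
  induction items with
  | nil => rfl
  | cons a t ih =>
    by_cases hax : a.1 = x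
    · have hak : ¬ (a.1 = k) := by rw [hax]; exact hxk
      simp [hax, hxk]
    · by_cases hak : a.1 = k
      · simp only [List.filter_cons, hak]
        simpa [List.find?_cons, hax] using ih
      · simp only [List.filter_cons]
        simpa [List.find?_cons, hax, hak] using ih

lemma getD_erase (d : PySem.Dict Int Int) (k x : Int) :
    (d.erase k).getD x 0 = if x = k then 0 else d.getD x 0 := by
  by_cases hxk : x = k
  · subst hxk
    simp only [PySem.Dict.erase, PySem.Dict.getD, PySem.Dict.get?]
    have h : List.find? (fun p => p.1 == x) (d.items.filter (fun p => !(p.1 == x))) = none := by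
      rw [List.find?_eq_none]
      intro p hp
      simp only [List.mem_filter] at hp
      simpa using hp.2
    simp [h]
  · simp only [PySem.Dict.erase, PySem.Dict.getD, PySem.Dict.get?, if_neg hxk]
    rw [find?_filter_ne d.items k x hxk]

lemma size_eq_dcount (d : PySem.Dict Int Int) (r : List Int)
    (hnd : d.keys.Nodup) (hmem : ∀ x, x ∈ d.keys ↔ x ∈ r) :
    d.size = dcount r := by
  have hlen : d.size = d.keys.length := by
    simp [PySem.Dict.size, PySem.Dict.keys]
  rw [hlen]
  have hperm : d.keys.Perm (PySem.Set.ofList r) := by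
    rw [List.perm_ext_iff_of_nodup hnd (PySem.Set.nodup_ofList r)]
    intro x
    simp only [PySem.Set.mem_ofList, hmem x]
  exact hperm.length_eq

lemma counter_size (l : List Int) : (PySem.Dict.counter l : PySem.Dict Int Int).size = dcount l := by
  have h : (PySem.Dict.counter l : PySem.Dict Int Int).size
      = (PySem.Dict.counter l : PySem.Dict Int Int).keys.length := by
    simp [PySem.Dict.size, PySem.Dict.keys]
  rw [h, PySem.Dict.keys_counter]
  rfl

-- ---- A's second loop computes gold ----
lemma A_loop (r : List Int) : ∀ (p : List Int) (ans : Int) (older younger : PySem.Dict Int Int),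
    younger = PySem.Dict.counter p →
    (∀ x, older.getD x 0 = (r.count x : Int)) →
    older.keys.Nodup →
    (∀ x, x ∈ older.keys ↔ x ∈ r) →
    (r.foldl solutionStep2 (ans, older, younger)).1 = ans + gold p r := by
  induction r with
  | nil => intro p ans older younger _ _ _ _; simp [gold]
  | cons x r' ih =>
    intro p ans older younger hy hval hnd hmem
    -- the state after one iteration of the loop body
    have hxmem : x ∈ older.keys := (hmem x).2 (List.mem_cons_self)
    have hcont : older.contains x = true := (PySem.Dict.contains_iff_mem_keys older x).2 hxmem
    have hycont : (if younger.contains x then younger.insert x (younger.getD x 0 + 1)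
        else younger.insert x 1) = PySem.Dict.counter (p ++ [x]) := by
      have : (if younger.contains x then younger.insert x (younger.getD x 0 + 1)
          else younger.insert x 1) = solutionStep1 younger x := rfl
      rw [this, step1_eq, hy, ← counter_snoc]
    have hyval : (PySem.Dict.counter (p ++ [x]) : PySem.Dict Int Int).getD x 0 ≠ 0 := by
      rw [PySem.Dict.getD_counter]
      have : 0 < (p ++ [x]).count x := by
        simp [List.count_append]
      omega
    -- older after the decrement
    set older1 := older.insert x (older.getD x 0 - 1) with holder1
    have hval1 : ∀ y, older1.getD y 0 = (r'.count y : Int) := by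
      intro y
      rw [holder1, PySem.Dict.getD_insert]
      by_cases hyx : y = x
      · subst hyx
        rw [if_pos rfl, hval y]
        simp
      · rw [if_neg hyx, hval y]
        simp [Ne.symm hyx]
    have hkeys1 : older1.keys = older.keys := PySem.Dict.keys_insert_of_contains older _ hcont
    have hnd1 : older1.keys.Nodup := by rw [hkeys1]; exact hnd
    -- the deletion check on older
    set older2 := if older1.getD x 0 = 0 then older1.erase x else older1 with holder2
    have hval2 : ∀ y, older2.getD y 0 = (r'.count y : Int) := by
      intro y
      rw [holder2]
      by_cases h0 : older1.getD x 0 = 0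
      · rw [if_pos h0, getD_erase]
        by_cases hyx : y = x
        · subst hyx
          rw [if_pos rfl]
          have := hval1 y
          omega
        · rw [if_neg hyx]; exact hval1 y
      · rw [if_neg h0]; exact hval1 y
    have hnd2 : older2.keys.Nodup := by
      rw [holder2]
      by_cases h0 : older1.getD x 0 = 0
      · rw [if_pos h0]; exact nodup_keys_erase _ _ hnd1
      · rw [if_neg h0]; exact hnd1
    have hmem2 : ∀ y, y ∈ older2.keys ↔ y ∈ r' := by
      intro y
      rw [holder2]
      by_cases h0 : older1.getD x 0 = 0
      · have hx0 : r'.count x = 0 := by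
          have := hval1 x
          rw [h0] at this
          exact_mod_cast this.symm
        rw [if_pos h0, keys_erase_mem, hkeys1, hmem y]
        constructor
        · rintro ⟨hmem', hne⟩
          rcases List.mem_cons.1 hmem' with h | h
          · exact absurd h hne
          · exact h
        · intro hy
          refine ⟨List.mem_cons_of_mem x hy, ?_⟩
          rintro rfl
          exact (List.count_eq_zero.1 hx0) hy
      · have hx0 : r'.count x ≠ 0 := by
          intro hc
          apply h0
          rw [hval1 x, hc]
          rfl
        rw [if_neg h0, hkeys1, hmem y]
        have hxr : x ∈ r' := List.count_pos_iff.1 (Nat.pos_of_ne_zero hx0)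
        constructor
        · intro hy
          rcases List.mem_cons.1 hy with h | h
          · subst h; exact hxr
          · exact h
        · exact List.mem_cons_of_mem x
    -- sizes
    have hsz_old : older2.size = dcount r' := size_eq_dcount older2 r' hnd2 hmem2
    have hsz_yng : (PySem.Dict.counter (p ++ [x]) : PySem.Dict Int Int).size = dcount (p ++ [x]) :=
      counter_size (p ++ [x])
    -- unfold one loop iteration
    have hstep : solutionStep2 (ans, older, younger) x =
        ((if dcount (p ++ [x]) = dcount r' then ans + 1 else ans),
         older2, PySem.Dict.counter (p ++ [x])) := by
      unfold solutionStep2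
      simp only [hycont, if_neg hyval]
      rw [← holder1, ← holder2, hsz_old, hsz_yng]
      by_cases hc : dcount (p ++ [x]) = dcount r'
      · rw [if_pos hc.symm, if_pos hc]
      · rw [if_neg (fun h => hc h.symm), if_neg hc]
    rw [List.foldl_cons, hstep,
      ih (p ++ [x]) _ older2 (PySem.Dict.counter (p ++ [x])) rfl hval2 hnd2 hmem2]
    rw [gold_cons]
    by_cases hc : dcount (p ++ [x]) = dcount r'
    · rw [if_pos hc, if_pos hc]; ring
    · rw [if_neg hc, if_neg hc]; ring

-- ---- B's suffix pass builds the distinct-count table ----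
lemma B_pass1 (l : List Int) :
    l.foldl altStep1 (PySem.Dict.empty, [0]) =
      (PySem.Dict.counter l,
       (0 : Int) :: (List.range l.length).map (fun j => (dcount (l.take (j + 1)) : Int))) := by
  induction l using List.reverseRecOn with
  | nil => rfl
  | append_singleton l x ih =>
    rw [List.foldl_append, ih, List.foldl_cons, List.foldl_nil]
    unfold altStep1
    simp only [← counter_snoc, counter_size]
    rw [List.length_append, List.length_singleton, List.range_succ, List.map_append]
    congr 1
    rw [← List.cons_append]
    congr 1
    · congr 1
      apply List.map_congr_left
      intro j hj
      have hjlt : j < l.length := List.mem_range.1 hj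
      rw [List.take_append_of_le_length (by omega)]
    · simp only [List.map_cons, List.map_nil]
      congr 2
      rw [List.take_of_length_le (by simp)]

lemma B_table (t : List Int) :
    PySem.List.slice ((t.reverse.foldl altStep1 (PySem.Dict.empty, [0])).2.reverse) (some 1) none
      = (List.range t.length).map (fun i => (dcount (t.drop (i + 1)) : Int)) := by
  rw [B_pass1, PySem.List.slice_from_one, List.length_reverse]
  have hdc : ∀ m : Nat, dcount (t.reverse.take m) = dcount (t.drop (t.length - m)) := by
    intro m
    rw [List.take_reverse]
    exact dcount_congr (fun y => List.mem_reverse)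
  apply List.ext_getElem
  · simp
  · intro i h1 h2
    simp only [List.length_map, List.length_range] at h2
    rw [List.getElem_tail, List.getElem_reverse, List.getElem_map, List.getElem_range]
    simp only [List.length_cons, List.length_map, List.length_range]
    have hidx : t.length + 1 - 1 - (i + 1) = t.length - 1 - i := by omega
    simp only [hidx]
    by_cases hlast : i = t.length - 1
    · have hi0 : t.length - 1 - i = 0 := by omega
      simp only [hi0, List.getElem_cons_zero]
      rw [List.drop_of_length_le (by omega)]
      rfl
    · have hk : t.length - 1 - i = (t.length - 2 - i) + 1 := by omega
      simp only [hk, List.getElem_cons_succ, List.getElem_map, List.getElem_range]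
      rw [hdc]
      have harg : t.length - (t.length - 2 - i + 1) = i + 1 := by omega
      rw [harg]

-- ---- B's prefix pass computes gold ----
lemma B_loop (r : List Int) : ∀ (p : List Int) (ans : Int),
    ((r.zip ((List.range r.length).map (fun i => (dcount (r.drop (i + 1)) : Int)))).foldl
        altStep2 (PySem.Set.ofList p, ans)).2 = ans + gold p r := by
  induction r with
  | nil => intro p ans; simp [gold]
  | cons x r' ih =>
    intro p ans
    have hrange : (List.range (x :: r').length).map (fun i => (dcount ((x :: r').drop (i + 1)) : Int))
        = (dcount r' : Int) :: (List.range r'.length).map (fun i => (dcount (r'.drop (i + 1)) : Int)) := by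
      rw [List.length_cons, List.range_succ_eq_map, List.map_cons, List.map_map]
      rfl
    rw [hrange, List.zip_cons_cons, List.foldl_cons]
    have hstep : altStep2 (PySem.Set.ofList p, ans) (x, (dcount r' : Int))
        = (PySem.Set.ofList (p ++ [x]),
           if dcount (p ++ [x]) = dcount r' then ans + 1 else ans) := by
      show (PySem.Set.add (PySem.Set.ofList p) x,
          if (PySem.Set.add (PySem.Set.ofList p) x).len = (dcount r' : Int) then ans + 1 else ans)
        = _
      rw [← PySem.Set.ofList_append_singleton]
      congr 1
      have hlen : PySem.Set.len (PySem.Set.ofList (p ++ [x])) = (dcount (p ++ [x]) : Int) := rfl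
      rw [hlen]
      by_cases hc : dcount (p ++ [x]) = dcount r'
      · rw [if_pos (by exact_mod_cast hc), if_pos hc]
      · rw [if_neg (fun h => hc (by exact_mod_cast h)), if_neg hc]
    rw [hstep, ih (p ++ [x])]
    rw [gold_cons]
    by_cases hc : dcount (p ++ [x]) = dcount r'
    · rw [if_pos hc, if_pos hc]; ring
    · rw [if_neg hc, if_neg hc]; ring

-- ===== VERDICT (by name: the statement is the Claim_ definition above) =====
theorem solution_spec : Claim_equal_solution := by
  intro topping _
  unfold Spec_solution solution solution_alt
  simp only []
  rw [foldl_step1_eq_counter, B_table,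
    A_loop topping [] 0 (PySem.Dict.counter topping) PySem.Dict.empty rfl
      (by intro x; rw [PySem.Dict.getD_counter])
      (PySem.Dict.nodup_keys_counter topping)
      (by intro x; rw [PySem.Dict.keys_counter]; exact PySem.Set.mem_ofList _ _),
    show (PySem.Set.empty : PySem.Set Int) = PySem.Set.ofList [] from rfl,
    B_loop topping []]
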